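-- pv_equiv track=rewrite | github.com/haekyu/MFRWR | src/code/entire_helper.py | map_entity
-- ===== SOURCE A (Python) =====
-- def map_entity(dat, e2th, th2e, num_specific, num_entity):
-- 	# Input:
-- 	#  - e2th: a dictionary whose key is an entity's id
-- 	#          and value is its sequence
-- 	#  - th2e: a dictionary whose key is an entity's sequence
-- 	#          and value is its id
-- 	#  - num_entity: the total number of entity
-- 	#  - num_specific: the total number of members in
-- 	#                  the entity's class. (e.g, # users)
-- 	# Output:
-- 	#  - e2th: updated e2th by adding information in dat
-- 	#  - th2e: updated th2e by adding information in dat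
-- 	#  - num_entity: updated num_entity by adding information in dat
-- 	#  - num_specific: updated num_specific by adding information in dat
-- 	for e in dat:
-- 		e = int(e)
-- 		if not(e in e2th):
-- 			e2th[e] = num_entity
-- 			th2e[num_entity] = e
-- 			num_specific += 1
-- 			num_entity += 1
-- 	return e2th, th2e, num_entity, num_specific
-- ===== SOURCE B (Python) =====
-- def map_entity(dat, e2th, th2e, num_specific, num_entity):
--     new = []
--     for e in dat:
--         e = int(e)
--         if e not in e2th and e not in new:
--             new.append(e)
--     for i, e in enumerate(new):
--         e2th[e] = num_entity + i
--         th2e[num_entity + i] = e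
--     num_specific += len(new)
--     num_entity += len(new)
--     return e2th, th2e, num_entity, num_specific
-- ===== Notes on version B (the rewrite author's own statement) =====
-- stated objective: alternative
-- what changed: Replaced the single assign-and-increment pass by a two-pass decomposition: first collect the fresh (deduplicated) entities into an ordered list, then assign consecutive ids via enumerate and bump both counters once by its length.
import Mathlib
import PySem

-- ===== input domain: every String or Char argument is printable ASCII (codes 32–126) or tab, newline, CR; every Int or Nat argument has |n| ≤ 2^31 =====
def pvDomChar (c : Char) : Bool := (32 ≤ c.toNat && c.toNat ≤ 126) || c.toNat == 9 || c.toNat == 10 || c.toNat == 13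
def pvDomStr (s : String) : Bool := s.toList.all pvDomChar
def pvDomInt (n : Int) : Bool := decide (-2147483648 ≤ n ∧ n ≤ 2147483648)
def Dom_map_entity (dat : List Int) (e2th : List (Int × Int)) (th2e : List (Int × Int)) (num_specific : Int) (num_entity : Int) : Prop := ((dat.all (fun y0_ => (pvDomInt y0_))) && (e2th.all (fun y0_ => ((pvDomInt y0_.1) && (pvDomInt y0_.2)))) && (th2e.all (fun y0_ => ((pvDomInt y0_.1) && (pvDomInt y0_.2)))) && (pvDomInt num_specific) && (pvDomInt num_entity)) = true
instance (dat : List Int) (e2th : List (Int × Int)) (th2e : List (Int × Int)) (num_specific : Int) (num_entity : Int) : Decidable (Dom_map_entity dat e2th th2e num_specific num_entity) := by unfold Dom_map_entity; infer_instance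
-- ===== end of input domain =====

-- B replaces A's single assign-and-increment pass by a collect-fresh-entities pass followed by an
-- enumerate pass that assigns consecutive ids and bumps both counters once (objective: alternative
-- decomposition). Both A and B mutate e2th/th2e in place in Python; the theorem is about the
-- returned values (which include those dicts).

-- ===== PORT A =====
-- the 'for e in dat' loop of A, carrying (e2th, th2e, num_specific, num_entity); int(e) is the identity on Int
def pvLoopA : List Int → PySem.Dict Int Int → PySem.Dict Int Int → Int → Int →
    PySem.Dict Int Int × PySem.Dict Int Int × Int × Int
  | [], d, t, ns, ne => (d, t, ns, ne)
  | e :: rest, d, t, ns, ne =>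
      if d.contains e then pvLoopA rest d t ns ne
      else pvLoopA rest (d.insert e ne) (t.insert ne e) (ns + 1) (ne + 1)

def map_entity (dat : List Int) (e2th : List (Int × Int)) (th2e : List (Int × Int)) (num_specific : Int) (num_entity : Int) : (List (Int × Int)) × (List (Int × Int)) × Int × Int :=
  let r := pvLoopA dat (PySem.Dict.mk e2th) (PySem.Dict.mk th2e) num_specific num_entity
  -- return e2th, th2e, num_entity, num_specific
  (r.1.items, r.2.1.items, r.2.2.2, r.2.2.1)

-- ===== PORT B =====
def map_entity_alt (dat : List Int) (e2th : List (Int × Int)) (th2e : List (Int × Int)) (num_specific : Int) (num_entity : Int) : (List (Int × Int)) × (List (Int × Int)) × Int × Int :=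
  let d0 := PySem.Dict.mk e2th
  -- new = []; for e in dat: if e not in e2th and e not in new: new.append(e)
  let new := dat.foldl (fun acc e => if d0.contains e || acc.contains e then acc else acc ++ [e]) []
  -- for i, e in enumerate(new): e2th[e] = num_entity + i; th2e[num_entity + i] = e
  let d := (PySem.List.enumerate new 0).foldl (fun d p => d.insert p.2 (num_entity + p.1)) d0
  let t := (PySem.List.enumerate new 0).foldl (fun t p => t.insert (num_entity + p.1) p.2) (PySem.Dict.mk th2e)
  (d.items, t.items, num_entity + (new.length : Int), num_specific + (new.length : Int))

-- ===== PRECONDITION & SPEC =====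
def Spec_map_entity (dat : List Int) (e2th : List (Int × Int)) (th2e : List (Int × Int)) (num_specific : Int) (num_entity : Int) (out : (List (Int × Int)) × (List (Int × Int)) × Int × Int) : Prop := out = map_entity_alt dat e2th th2e num_specific num_entity
instance (dat : List Int) (e2th : List (Int × Int)) (th2e : List (Int × Int)) (num_specific : Int) (num_entity : Int) (out : (List (Int × Int)) × (List (Int × Int)) × Int × Int) : Decidable (Spec_map_entity dat e2th th2e num_specific num_entity out) := by unfold Spec_map_entity; infer_instance

-- ===== CLAIM (what is proved, stated in full; the proofs are below) =====
def Claim_equal_map_entity : Prop := ∀ (dat : List Int) (e2th : List (Int × Int)) (th2e : List (Int × Int)) (num_specific : Int) (num_entity : Int), Dom_map_entity dat e2th th2e num_specific num_entity → Spec_map_entity dat e2th th2e num_specific num_entity (map_entity dat e2th th2e num_specific num_entity)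

-- ===== LEMMAS AND PROOFS =====

-- B's enumerate-assignment pass, as a function of the collected list (proof-side abbreviation)
def pvAsgD (acc : List Int) (d : PySem.Dict Int Int) (ne : Int) : PySem.Dict Int Int :=
  (PySem.List.enumerate acc 0).foldl (fun d p => d.insert p.2 (ne + p.1)) d

def pvAsgT (acc : List Int) (t : PySem.Dict Int Int) (ne : Int) : PySem.Dict Int Int :=
  (PySem.List.enumerate acc 0).foldl (fun t p => t.insert (ne + p.1) p.2) t

lemma pv_enumerate_append (xs ys : List Int) : ∀ s : Int,
    PySem.List.enumerate (xs ++ ys) s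
      = PySem.List.enumerate xs s ++ PySem.List.enumerate ys (s + xs.length) := by
  induction xs with
  | nil => intro s; simp [PySem.List.enumerate_nil]
  | cons x xs ih =>
      intro s
      simp only [List.cons_append, PySem.List.enumerate_cons, ih (s + 1), List.length_cons]
      push_cast; ring_nf

lemma pvAsgD_append (acc : List Int) (e : Int) (d : PySem.Dict Int Int) (ne : Int) :
    pvAsgD (acc ++ [e]) d ne = (pvAsgD acc d ne).insert e (ne + acc.length) := by
  simp [pvAsgD, pv_enumerate_append, PySem.List.enumerate_cons, PySem.List.enumerate_nil]

lemma pvAsgT_append (acc : List Int) (e : Int) (t : PySem.Dict Int Int) (ne : Int) :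
    pvAsgT (acc ++ [e]) t ne = (pvAsgT acc t ne).insert (ne + acc.length) e := by
  simp [pvAsgT, pv_enumerate_append, PySem.List.enumerate_cons, PySem.List.enumerate_nil]

lemma pvAsgD_contains (acc : List Int) (d : PySem.Dict Int Int) (ne x : Int) :
    (pvAsgD acc d ne).contains x = (d.contains x || acc.contains x) := by
  induction acc using List.reverseRecOn with
  | nil => simp [pvAsgD, PySem.List.enumerate_nil]
  | append_singleton acc e ih =>
      simp only [pvAsgD_append, PySem.Dict.contains_insert, ih, List.contains_append]
      by_cases hx : x = e <;> simp [hx, Bool.or_comm, Bool.or_assoc]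

-- main invariant: A's loop, started from the state B reaches after assigning the already-collected
-- prefix acc, lands where B lands after collecting the rest of dat
lemma pv_main (dat : List Int) : ∀ (acc : List Int) (d t : PySem.Dict Int Int) (ns ne : Int),
    pvLoopA dat (pvAsgD acc d ne) (pvAsgT acc t ne) (ns + acc.length) (ne + acc.length)
      = (fun new => (pvAsgD new d ne, pvAsgT new t ne, ns + (new.length : Int), ne + (new.length : Int)))
          (dat.foldl (fun a e => if d.contains e || a.contains e then a else a ++ [e]) acc) := by
  induction dat with
  | nil => intro acc d t ns ne; rfl
  | cons e rest ih =>
      intro acc d t ns ne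
      simp only [pvLoopA, List.foldl_cons, pvAsgD_contains]
      by_cases h : (d.contains e || acc.contains e) = true
      · simp only [h, if_true, ih]
      · simp only [Bool.not_eq_true] at h
        simp only [h, Bool.false_eq_true, if_false]
        have h1 : (pvAsgD acc d ne).insert e (ne + acc.length) = pvAsgD (acc ++ [e]) d ne :=
          (pvAsgD_append acc e d ne).symm
        have h2 : (pvAsgT acc t ne).insert (ne + acc.length) e = pvAsgT (acc ++ [e]) t ne :=
          (pvAsgT_append acc e t ne).symm
        rw [h1, h2]
        have h3 : ns + (acc.length : Int) + 1 = ns + ((acc ++ [e]).length : Int) := by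
          simp; ring
        have h4 : ne + (acc.length : Int) + 1 = ne + ((acc ++ [e]).length : Int) := by
          simp; ring
        rw [h3, h4, ih]

-- ===== VERDICT (by name: the statement is the Claim_ definition above) =====
theorem map_entity_spec : Claim_equal_map_entity := by
  intro dat e2th th2e ns ne _
  unfold Spec_map_entity map_entity map_entity_alt
  have := pv_main dat [] (PySem.Dict.mk e2th) (PySem.Dict.mk th2e) ns ne
  simp only [pvAsgD, pvAsgT, PySem.List.enumerate_nil, List.foldl_nil, List.length_nil,
    Nat.cast_zero, add_zero] at this
  simp only [this]
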